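-- pv_equiv track=rewrite | github.com/Whippsie/BioInfo | question1.py | genIndelEnd
-- ===== SOURCE A (Python) =====
-- def genIndelEnd(s1,s2,end,size,sq1,sq2):
--   size_ligne = size[0] - 1
--   size_col = size[1] - 1
--
--   if end[0] < size_ligne:
--     x = end[0]
--     while x < size_ligne:
--       s1 += "-"
--       s2 += sq2[x]
--       x += 1
--   elif end[1] < size_col:
--     x = end[1]
--     while x < size_col:
--       s2 += "-"
--       s1 += sq1[x]
--       x += 1
--
--   return s1,s2
-- ===== SOURCE B (Python) =====
-- def genIndelEnd(s1, s2, end, size, sq1, sq2):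
--     size_ligne = size[0] - 1
--     size_col = size[1] - 1
--     if end[0] < size_ligne:
--         s1 += "-" * (size_ligne - end[0])
--         s2 += sq2[end[0]:size_ligne]
--     elif end[1] < size_col:
--         s2 += "-" * (size_col - end[1])
--         s1 += sq1[end[1]:size_col]
--     return s1, s2
-- ===== Notes on version B (the rewrite author's own statement) =====
-- stated objective: faster
-- what changed: The per-character while-loops (one string += per character) are replaced by closed-form padding ('-' * n) and a single slice per branch, computing each padded suffix in one bulk operation.
-- outside the precondition, e.g. on genIndelEnd('', '', (-1, 0), (2, 0), '', 'ab'): A returns ('--', 'ba'), B returns ('--', '')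
import Mathlib
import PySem

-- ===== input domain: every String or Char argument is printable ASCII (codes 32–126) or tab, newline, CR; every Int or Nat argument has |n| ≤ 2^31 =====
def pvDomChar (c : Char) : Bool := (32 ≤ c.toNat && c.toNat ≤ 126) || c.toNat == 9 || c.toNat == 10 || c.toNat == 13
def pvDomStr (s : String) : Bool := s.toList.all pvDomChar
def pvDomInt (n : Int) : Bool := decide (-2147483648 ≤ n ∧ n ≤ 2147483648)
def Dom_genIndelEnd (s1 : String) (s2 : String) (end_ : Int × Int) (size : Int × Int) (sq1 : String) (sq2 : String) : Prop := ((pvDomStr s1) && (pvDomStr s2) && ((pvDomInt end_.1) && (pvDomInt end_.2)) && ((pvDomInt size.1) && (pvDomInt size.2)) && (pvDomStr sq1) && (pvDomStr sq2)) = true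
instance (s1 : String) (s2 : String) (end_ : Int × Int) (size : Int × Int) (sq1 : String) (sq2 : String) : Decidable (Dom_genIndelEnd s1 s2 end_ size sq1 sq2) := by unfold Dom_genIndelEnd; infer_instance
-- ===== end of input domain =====

-- B replaces A's per-character while-loops by closed-form string repetition and one slice (simpler, one
-- operation per branch); equivalence is about the return value only (neither version mutates its arguments).

-- ===== PORT A =====
-- the while-loop of either branch: fuel = number of remaining iterations; acc1 receives '-', acc2 receives
-- sq[x] (in A's second branch the roles of s1 and s2 are swapped, so the caller swaps the accumulators).
-- pyGet? = none is Python's IndexError: the loop's value there is irrelevant (excluded by Pre_).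
def padLoop (sq : List Char) (stop : Int) : Nat → Int → List Char → List Char → List Char × List Char
  | 0, _, acc1, acc2 => (acc1, acc2)
  | Nat.succ n, x, acc1, acc2 =>
    if x < stop then
      match PySem.List.pyGet? sq x with
      | some c => padLoop sq stop n (x + 1) (acc1 ++ ['-']) (acc2 ++ [c])
      | none => (acc1, acc2)
    else (acc1, acc2)

def genIndelEnd (s1 : String) (s2 : String) (end_ : Int × Int) (size : Int × Int) (sq1 : String) (sq2 : String) : String × String :=
  let size_ligne := size.1 - 1
  let size_col := size.2 - 1
  if end_.1 < size_ligne then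
    let r := padLoop sq2.toList size_ligne (size_ligne - end_.1).toNat end_.1 s1.toList s2.toList
    (String.ofList r.1, String.ofList r.2)
  else if end_.2 < size_col then
    let r := padLoop sq1.toList size_col (size_col - end_.2).toNat end_.2 s2.toList s1.toList
    (String.ofList r.2, String.ofList r.1)
  else (s1, s2)

-- ===== PORT B =====
-- Source B: same guards, but '-' * n  and  a slice sq[a:b]  instead of the loops (list side of PySem.Str.slice).
def genIndelEnd_alt (s1 : String) (s2 : String) (end_ : Int × Int) (size : Int × Int) (sq1 : String) (sq2 : String) : String × String :=
  let size_ligne := size.1 - 1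
  let size_col := size.2 - 1
  if end_.1 < size_ligne then
    (String.ofList (s1.toList ++ List.replicate (size_ligne - end_.1).toNat '-'),
     String.ofList (s2.toList ++ PySem.List.slice sq2.toList (some end_.1) (some size_ligne)))
  else if end_.2 < size_col then
    (String.ofList (s1.toList ++ PySem.List.slice sq1.toList (some end_.2) (some size_col)),
     String.ofList (s2.toList ++ List.replicate (size_col - end_.2).toNat '-'))
  else (s1, s2)

-- ===== PRECONDITION & SPEC =====
-- Pre_ excludes (a) inputs where A raises IndexError (the active loop reads past either end of the
-- sequence) and (b) inputs with a negative start position whose loop crosses index 0, where A's value is an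
-- accident of Python's negative-index wraparound (outside the natural domain of alignment positions);
-- all-negative index ranges, where wraparound and slicing agree, stay inside Pre_.
def Pre_genIndelEnd (s1 : String) (s2 : String) (end_ : Int × Int) (size : Int × Int) (sq1 : String) (sq2 : String) : Prop :=
  (end_.1 < size.1 - 1 →
    (0 ≤ end_.1 ∧ size.1 - 1 ≤ (sq2.toList.length : Int)) ∨
    (size.1 - 1 < 0 ∧ 0 ≤ (sq2.toList.length : Int) + end_.1)) ∧
  (size.1 - 1 ≤ end_.1 → end_.2 < size.2 - 1 →
    (0 ≤ end_.2 ∧ size.2 - 1 ≤ (sq1.toList.length : Int)) ∨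
    (size.2 - 1 < 0 ∧ 0 ≤ (sq1.toList.length : Int) + end_.2))
instance (s1 : String) (s2 : String) (end_ : Int × Int) (size : Int × Int) (sq1 : String) (sq2 : String) : Decidable (Pre_genIndelEnd s1 s2 end_ size sq1 sq2) := by unfold Pre_genIndelEnd; infer_instance

def pvWitness_genIndelEnd : String × String × (Int × Int) × (Int × Int) × String × String :=
  ("AC", "A-", (1, 1), (3, 2), "AG", "ACG")

def Spec_genIndelEnd (s1 : String) (s2 : String) (end_ : Int × Int) (size : Int × Int) (sq1 : String) (sq2 : String) (out : String × String) : Prop := out = genIndelEnd_alt s1 s2 end_ size sq1 sq2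
instance (s1 : String) (s2 : String) (end_ : Int × Int) (size : Int × Int) (sq1 : String) (sq2 : String) (out : String × String) : Decidable (Spec_genIndelEnd s1 s2 end_ size sq1 sq2 out) := by unfold Spec_genIndelEnd; infer_instance

-- ===== CLAIM (what is proved, stated in full; the proofs are below) =====
def Claim_equal_genIndelEnd : Prop := ∀ (s1 : String) (s2 : String) (end_ : Int × Int) (size : Int × Int) (sq1 : String) (sq2 : String), Dom_genIndelEnd s1 s2 end_ size sq1 sq2 → Pre_genIndelEnd s1 s2 end_ size sq1 sq2 → Spec_genIndelEnd s1 s2 end_ size sq1 sq2 (genIndelEnd s1 s2 end_ size sq1 sq2)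

-- ===== LEMMAS AND PROOFS =====

-- the loop with nonnegative start (and stop within the sequence) = dashes ++ the drop/take window
lemma padLoop_nonneg (sq : List Char) (stop : Int) :
    ∀ (n : Nat) (x : Int) (acc1 acc2 : List Char), 0 ≤ x → x ≤ stop → stop ≤ (sq.length : Int) →
    (stop - x).toNat = n →
    padLoop sq stop n x acc1 acc2 =
      (acc1 ++ List.replicate n '-', acc2 ++ List.take n (List.drop x.toNat sq)) := by
  intro n
  induction n with
  | zero => intro x acc1 acc2 _ _ _ _; simp [padLoop]
  | succ n ih =>
    intro x acc1 acc2 h0 hx hl hn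
    have hxs : x < stop := by omega
    have hlt : x < (sq.length : Int) := by omega
    have hidx : x.toNat < sq.length := by omega
    simp only [padLoop, if_pos hxs, PySem.List.pyGet?_eq_some_getElem sq h0 hlt]
    rw [ih (x + 1) (acc1 ++ ['-']) (acc2 ++ [sq[x.toNat]]) (by omega) (by omega) hl (by omega)]
    have hdrop : List.drop x.toNat sq = sq[x.toNat] :: List.drop (x.toNat + 1) sq :=
      List.drop_eq_getElem_cons hidx
    have hsucc : (x + 1).toNat = x.toNat + 1 := by omega
    simp only [hsucc, hdrop, List.take_succ_cons, List.replicate_succ, List.append_assoc,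
      List.singleton_append]

-- the loop with an all-negative index range (stop < 0, -len ≤ x): every read wraps to len + x
lemma padLoop_negrange (sq : List Char) (stop : Int) :
    ∀ (n : Nat) (x : Int) (acc1 acc2 : List Char), stop < 0 → x ≤ stop → 0 ≤ (sq.length : Int) + x →
    (stop - x).toNat = n →
    padLoop sq stop n x acc1 acc2 =
      (acc1 ++ List.replicate n '-', acc2 ++ List.take n (List.drop ((sq.length : Int) + x).toNat sq)) := by
  intro n
  induction n with
  | zero => intro x acc1 acc2 _ _ _ _; simp [padLoop]
  | succ n ih =>
    intro x acc1 acc2 hs hx h0 hn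
    have hxs : x < stop := by omega
    have hxneg : x < 0 := by omega
    have hkpos : 0 < (-x).toNat := by omega
    have hkle : (-x).toNat ≤ sq.length := by omega
    have hxk : x = -(((-x).toNat : Nat) : Int) := by omega
    have hidx : sq.length - (-x).toNat < sq.length := by omega
    have hget : PySem.List.pyGet? sq x = some sq[sq.length - (-x).toNat] := by
      have hg := PySem.List.pyGet?_neg_natCast sq (-x).toNat hkpos hkle
      rw [← hxk] at hg
      rw [hg]
      exact List.getElem?_eq_getElem hidx
    simp only [padLoop, if_pos hxs, hget]
    rw [ih (x + 1) (acc1 ++ ['-']) (acc2 ++ [sq[sq.length - (-x).toNat]]) hs (by omega) (by omega) (by omega)]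
    have heq : ((sq.length : Int) + x).toNat = sq.length - (-x).toNat := by omega
    have hdrop : List.drop (((sq.length : Int) + x).toNat) sq =
        sq[sq.length - (-x).toNat] :: List.drop (((sq.length : Int) + (x + 1)).toNat) sq := by
      rw [heq]
      have : ((sq.length : Int) + (x + 1)).toNat = sq.length - (-x).toNat + 1 := by omega
      rw [this]
      exact List.drop_eq_getElem_cons hidx
    simp only [hdrop, List.take_succ_cons, List.replicate_succ, List.append_assoc,
      List.singleton_append]

-- the slice of Source B equals the loop's drop/take window, in both Pre_ cases
lemma slice_eq_window_nonneg (sq : List Char) (x stop : Int) (h0 : 0 ≤ x) (hx : x ≤ stop) :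
    PySem.List.slice sq (some x) (some stop) = List.take (stop - x).toNat (List.drop x.toNat sq) := by
  rw [PySem.List.slice_toNat sq h0 (by omega)]
  congr 1
  omega

lemma slice_eq_window_neg (sq : List Char) (x stop : Int) (hs : stop < 0) (hx : x ≤ stop)
    (h0 : 0 ≤ (sq.length : Int) + x) :
    PySem.List.slice sq (some x) (some stop) =
      List.take (stop - x).toNat (List.drop ((sq.length : Int) + x).toNat sq) := by
  have hc1 : PySem.List.clampIdx sq.length x = ((sq.length : Int) + x).toNat := by
    have hxk : x = -(((-x).toNat : Nat) : Int) := by omega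
    rw [hxk, PySem.List.clampIdx_neg_natCast _ _ (by omega)]
    omega
  have hc2 : PySem.List.clampIdx sq.length stop = ((sq.length : Int) + stop).toNat := by
    have hsk : stop = -(((-stop).toNat : Nat) : Int) := by omega
    rw [hsk, PySem.List.clampIdx_neg_natCast _ _ (by omega)]
    omega
  have : PySem.List.slice sq (some x) (some stop) =
      List.take (PySem.List.clampIdx sq.length stop - PySem.List.clampIdx sq.length x)
        (List.drop (PySem.List.clampIdx sq.length x) sq) := by
    simp [PySem.List.slice]
  rw [this, hc1, hc2]
  congr 1
  omega

-- ===== VERDICT (by name: the statement is the Claim_ definition above) =====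
theorem genIndelEnd_spec : Claim_equal_genIndelEnd := by
  intro s1 s2 end_ size sq1 sq2 _ hpre
  unfold Spec_genIndelEnd genIndelEnd genIndelEnd_alt
  simp only []
  split_ifs with h1 h2
  · rcases hpre.1 h1 with ⟨h0, hl⟩ | ⟨hs, h0⟩
    · rw [padLoop_nonneg sq2.toList _ _ _ _ _ h0 (by omega) hl rfl,
        slice_eq_window_nonneg sq2.toList _ _ h0 (by omega)]
    · rw [padLoop_negrange sq2.toList _ _ _ _ _ (by omega) (by omega) h0 rfl,
        slice_eq_window_neg sq2.toList _ _ (by omega) (by omega) h0]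
  · rcases hpre.2 (by omega) h2 with ⟨h0, hl⟩ | ⟨hs, h0⟩
    · rw [padLoop_nonneg sq1.toList _ _ _ _ _ h0 (by omega) hl rfl,
        slice_eq_window_nonneg sq1.toList _ _ h0 (by omega)]
    · rw [padLoop_negrange sq1.toList _ _ _ _ _ (by omega) (by omega) h0 rfl,
        slice_eq_window_neg sq1.toList _ _ (by omega) (by omega) h0]
  · rfl
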